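-- pv_equiv track=rewrite | github.com/iml1111/algorithm-study | src/sm_2round.py/1.py | solution
-- ===== SOURCE A (Python) =====
-- from collections import deque
--
-- def is_way(node):
-- 	return node not in {"1", "@"}
--
-- def get_start_idx(board, n, m):
-- 	for idx in range(n):
-- 		for jdx in range(m):
-- 			if board[idx][jdx] == '3':
-- 				return idx, jdx
-- 	raise RuntimeError("3이 없음")
--
-- def solution(board):
-- 	board = [list(i) for i in board]
-- 	N, M = len(board), len(board[0])
-- 	x, y = get_start_idx(board, N, M)
-- 	q = deque([(x,y)])
-- 	key, box = False, False
-- 	while q: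
-- 		x, y = q.popleft()
--
-- 		if 0 < x and is_way(board[x-1][y]):
-- 			q.append((x-1, y))
-- 		if 0 < y and is_way(board[x][y-1]):
-- 			q.append((x, y-1))
-- 		if x < N - 1 and is_way(board[x+1][y]):
-- 			q.append((x+1, y))
-- 		if y < M - 1 and is_way(board[x][y+1]):
-- 			q.append((x, y+1))
--
-- 		box = board[x][y] == '2' if not box else box
-- 		key = board[x][y] == '4' if not key else key
-- 		if box and key:
-- 			return 1
--
-- 		board[x][y] = '@'
--
-- 	return 0
-- ===== SOURCE B (Python) =====
-- def solution(board):
--     n = len(board)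
--     m = len(board[0])
--     sx, sy = next((i, j) for i in range(n) for j in range(m) if board[i][j] == '3')
--     reach = {(sx, sy)}
--     changed = True
--     while changed:
--         changed = False
--         for i in range(n):
--             for j in range(m):
--                 if (i, j) not in reach and board[i][j] not in ('1', '@') and \
--                         ((i - 1, j) in reach or (i, j - 1) in reach
--                          or (i + 1, j) in reach or (i, j + 1) in reach):
--                     reach.add((i, j))
--                     changed = True
--     box = any(board[i][j] == '2' for (i, j) in reach)
--     key = any(board[i][j] == '4' for (i, j) in reach)
--     return 1 if box and key else 0
-- ===== Notes on version B (the rewrite author's own statement) =====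
-- stated objective: alternative
-- what changed: A runs a worklist graph search (deque BFS) that mutates the board, marks cells '@' on pop and early-returns when both flags are set; B uses no queue, stack or frontier at all: it computes the reachable set as a fixpoint by repeated row-major raster sweeps over the whole grid (adding any non-wall cell adjacent to an already-reached cell, cascading within a sweep, until a sweep changes nothing), never mutates the board, and decides the answer by a final scan of the reached set for a '2' and a '4'.
-- outside the precondition, e.g. on solution(['1312334@1211', 'b2z24 ay43']): A returns 1, B raises IndexError; on solution(['31', '1']): A returns 0, B raises IndexError; on solution([]): A raises IndexError, B raises IndexError
import Mathlib
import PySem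

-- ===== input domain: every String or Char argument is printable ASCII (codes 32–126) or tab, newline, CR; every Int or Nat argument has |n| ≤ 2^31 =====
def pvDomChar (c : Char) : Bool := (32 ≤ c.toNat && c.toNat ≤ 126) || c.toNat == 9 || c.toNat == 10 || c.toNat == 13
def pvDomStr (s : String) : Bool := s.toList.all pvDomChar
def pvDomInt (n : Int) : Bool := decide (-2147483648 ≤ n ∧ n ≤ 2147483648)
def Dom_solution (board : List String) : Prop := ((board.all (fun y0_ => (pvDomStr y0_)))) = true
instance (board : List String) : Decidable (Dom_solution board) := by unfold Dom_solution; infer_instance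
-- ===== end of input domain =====

-- B replaces A's mutating deque BFS (mark-on-pop, early exit) by a worklist-free
-- fixpoint computation: repeated row-major raster sweeps over the whole grid grow the
-- reachable set until a sweep changes nothing; the answer is a final scan of that set.
-- Equivalence is proved on rectangular boards containing a '3' (Pre_solution below).

-- ===== PORT A =====
-- is_way(node): node not in {"1", "@"}
def isWay (c : Char) : Bool := !(c == '1' || c == '@')

-- board[i][j] as a total function; out-of-range reads default to '@' (a wall), which is
-- never reached on inputs satisfying Pre_solution (rectangular, indices guarded).
def cellI (g : List (List Char)) (i j : Int) : Char :=
  if 0 ≤ i ∧ 0 ≤ j then (g.getD i.toNat []).getD j.toNat '@' else '@'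

-- board[x][y] = '@' (in-place list update, no-op out of range)
def setRowAt : List Char → Nat → List Char
  | [], _ => []
  | _ :: t, 0 => '@' :: t
  | c :: t, j + 1 => c :: setRowAt t j

def setAt : List (List Char) → Nat → Nat → List (List Char)
  | [], _, _ => []
  | r :: t, 0, j => setRowAt r j :: t
  | r :: t, i + 1, j => r :: setAt t i j

def mark (g : List (List Char)) (i j : Int) : List (List Char) :=
  if 0 ≤ i ∧ 0 ≤ j then setAt g i.toNat j.toNat else g

-- get_start_idx: row-major scan for the first '3' (on rectangular boards this equals the
-- Python's scan over range(n) × range(m)).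
def scanRow : List Char → Int → Option Int
  | [], _ => none
  | c :: t, j => if c == '3' then some j else scanRow t (j + 1)

def scanG : List (List Char) → Int → Option (Int × Int)
  | [], _ => none
  | r :: t, i =>
    match scanRow r 0 with
    | some j => some (i, j)
    | none => scanG t (i + 1)

-- termination measure for the while loop: (#cells ≠ '@', weighted queue length)
def bfsU (g : List (List Char)) : Nat := (g.map (fun r => r.countP (fun c => !(c == '@')))).sum
def bfsW (g : List (List Char)) (e : Int × Int) : Nat := if cellI g e.1 e.2 = '@' then 5 else 1
def bfsG (g : List (List Char)) (q : List (Int × Int)) : Nat := (q.map (bfsW g)).sum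

theorem setRowAt_of_at (r : List Char) (j : Nat) (h : r.getD j '@' = '@') : setRowAt r j = r := by
  induction r generalizing j with
  | nil => simp [setRowAt]
  | cons c t ih =>
    cases j with
    | zero => simp only [List.getD_cons_zero] at h; simp [setRowAt, h]
    | succ j => simp only [List.getD_cons_succ] at h; simp [setRowAt, ih j h]

theorem setAt_of_at (g : List (List Char)) (i j : Nat)
    (h : (g.getD i []).getD j '@' = '@') : setAt g i j = g := by
  induction g generalizing i with
  | nil => simp [setAt]
  | cons r t ih =>
    cases i with
    | zero => simp only [List.getD_cons_zero] at h; simp [setAt, setRowAt_of_at r j h]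
    | succ i => simp only [List.getD_cons_succ] at h; simp [setAt, ih i h]

theorem mark_of_at (g : List (List Char)) (x y : Int) (h : cellI g x y = '@') :
    mark g x y = g := by
  unfold mark
  unfold cellI at h
  split
  · rename_i hp
    rw [if_pos hp] at h
    exact setAt_of_at g x.toNat y.toNat h
  · rfl

theorem countP_setRowAt_lt (r : List Char) (j : Nat) (h : r.getD j '@' ≠ '@') :
    (setRowAt r j).countP (fun c => !(c == '@')) < r.countP (fun c => !(c == '@')) := by
  induction r generalizing j with
  | nil => simp [List.getD] at h
  | cons c t ih =>
    cases j with
    | zero =>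
      simp only [List.getD_cons_zero] at h
      simp [setRowAt, h]
    | succ j =>
      simp only [List.getD_cons_succ] at h
      have := ih j h
      simp only [setRowAt, List.countP_cons]
      omega

theorem setAt_U_lt (g : List (List Char)) (i j : Nat)
    (h : (g.getD i []).getD j '@' ≠ '@') : bfsU (setAt g i j) < bfsU g := by
  induction g generalizing i with
  | nil => simp [List.getD] at h
  | cons r t ih =>
    cases i with
    | zero =>
      simp only [List.getD_cons_zero] at h
      simp only [setAt, bfsU, List.map_cons, List.sum_cons]
      have := countP_setRowAt_lt r j h
      omega
    | succ i =>
      simp only [List.getD_cons_succ] at h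
      have := ih i h
      simp only [setAt, bfsU, List.map_cons, List.sum_cons] at *
      omega

theorem bfsU_mark_lt (g : List (List Char)) (x y : Int) (h : cellI g x y ≠ '@') :
    bfsU (mark g x y) < bfsU g := by
  unfold mark
  unfold cellI at h
  split
  · rename_i hp
    rw [if_pos hp] at h
    exact setAt_U_lt g x.toNat y.toNat h
  · rename_i hp
    rw [if_neg hp] at h
    exact absurd rfl h

theorem bfsG_append (g : List (List Char)) (a b : List (Int × Int)) :
    bfsG g (a ++ b) = bfsG g a + bfsG g b := by
  simp [bfsG]

theorem bfsG_ite (g : List (List Char)) (P : Prop) [Decidable P] (d : Int × Int)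
    (hP : P → isWay (cellI g d.1 d.2) = true) :
    bfsG g (if P then [d] else []) ≤ 1 := by
  split
  · rename_i hp
    have hw := hP hp
    have : cellI g d.1 d.2 ≠ '@' := by
      intro he; rw [he] at hw; simp [isWay] at hw
    simp [bfsG, bfsW, this]
  · simp [bfsG]

theorem bfsG_cons_at (g : List (List Char)) (x y : Int) (rest : List (Int × Int))
    (h : cellI g x y = '@') : bfsG g ((x, y) :: rest) = 5 + bfsG g rest := by
  simp [bfsG, bfsW, h]

def bfs (g : List (List Char)) (n m : Int) (q : List (Int × Int)) (box key : Bool) : Int :=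
  match q with
  | [] => 0
  | (x, y) :: rest =>
    let a1 := if 0 < x ∧ isWay (cellI g (x - 1) y) = true then [(x - 1, y)] else []
    let a2 := if 0 < y ∧ isWay (cellI g x (y - 1)) = true then [(x, y - 1)] else []
    let a3 := if x < n - 1 ∧ isWay (cellI g (x + 1) y) = true then [(x + 1, y)] else []
    let a4 := if y < m - 1 ∧ isWay (cellI g x (y + 1)) = true then [(x, y + 1)] else []
    let box' := if box then box else cellI g x y == '2'
    let key' := if key then key else cellI g x y == '4'
    if box' && key' then 1
    else bfs (mark g x y) n m (rest ++ a1 ++ a2 ++ a3 ++ a4) box' key'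
termination_by (bfsU g, bfsG g q)
decreasing_by
  by_cases h : cellI g x y = '@'
  · rw [mark_of_at g x y h]
    apply Prod.Lex.right
    have h1 := bfsG_ite g (0 < x ∧ isWay (cellI g (x - 1) y) = true) (x - 1, y) (fun hp => hp.2)
    have h2 := bfsG_ite g (0 < y ∧ isWay (cellI g x (y - 1)) = true) (x, y - 1) (fun hp => hp.2)
    have h3 := bfsG_ite g (x < n - 1 ∧ isWay (cellI g (x + 1) y) = true) (x + 1, y) (fun hp => hp.2)
    have h4 := bfsG_ite g (y < m - 1 ∧ isWay (cellI g x (y + 1)) = true) (x, y + 1) (fun hp => hp.2)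
    rw [bfsG_cons_at g x y rest h]
    simp only [bfsG_append, dite_eq_ite]
    omega
  · exact Prod.Lex.left _ _ (bfsU_mark_lt g x y h)

def solution (board : List String) : Int :=
  let g := board.map (fun s => s.toList)
  let n : Int := g.length
  let m : Int := (g.headD []).length
  -- get_start_idx reads only columns jdx < m, hence the 'take' (exact wherever Python returns)
  match scanG (g.map (fun r => r.take (g.headD []).length)) 0 with
  | none => 0   -- Python raises RuntimeError here; excluded by Pre_solution
  | some s => bfs g n m [s] false false

-- ===== PORT B =====
-- the cells (i, j) of the two nested 'for i in range(n): for j in range(m)' loops,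
-- in row-major order
def gridCells (n m : Int) : List (Int × Int) :=
  (List.range n.toNat).flatMap (fun i => (List.range m.toNat).map (fun j => ((i : Int), (j : Int))))

-- one cell of a sweep: the body of the inner for loop; the membership test
-- board[i][j] not in ('1', '@') is the same predicate as A's is_way, so isWay is reused
def bTry (g : List (List Char)) (st : List (Int × Int) × Bool) (c : Int × Int) :
    List (Int × Int) × Bool :=
  if c ∉ st.1 ∧ isWay (cellI g c.1 c.2) = true ∧
      ((c.1 - 1, c.2) ∈ st.1 ∨ (c.1, c.2 - 1) ∈ st.1 ∨
       (c.1 + 1, c.2) ∈ st.1 ∨ (c.1, c.2 + 1) ∈ st.1)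
  then (PySem.Set.add st.1 c, true) else st

-- fold fact needed for termination (and reused by the proofs below): a sweep appends
-- fresh in-sweep cells and reports whether it added anything
theorem bTry_grow (g : List (List Char)) (L : List (Int × Int)) (v : List (Int × Int))
    (ch : Bool) :
    ∃ new, L.foldl (bTry g) (v, ch) = (v ++ new, ch || !new.isEmpty) ∧
      ∀ d ∈ new, d ∈ L ∧ d ∉ v := by
  induction L generalizing v ch with
  | nil => exact ⟨[], by simp⟩
  | cons c L ih =>
    simp only [List.foldl_cons]
    by_cases hc : c ∉ v ∧ isWay (cellI g c.1 c.2) = true ∧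
        ((c.1 - 1, c.2) ∈ v ∨ (c.1, c.2 - 1) ∈ v ∨ (c.1 + 1, c.2) ∈ v ∨ (c.1, c.2 + 1) ∈ v)
    · have hstep : bTry g (v, ch) c = (v ++ [c], true) := by
        simp only [bTry, if_pos hc]
        rw [PySem.Set.add_of_not_mem hc.1]
      rw [hstep]
      obtain ⟨new, e1, e2⟩ := ih (v ++ [c]) true
      refine ⟨c :: new, ?_, ?_⟩
      · rw [e1, List.append_assoc]
        simp
      · intro d hd
        rcases List.mem_cons.1 hd with rfl | hd
        · exact ⟨List.mem_cons_self .., hc.1⟩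
        · obtain ⟨hL, hv⟩ := e2 d hd
          exact ⟨List.mem_cons_of_mem _ hL, fun h => hv (List.mem_append_left _ h)⟩
    · have hstep : bTry g (v, ch) c = (v, ch) := by simp only [bTry, if_neg hc]
      rw [hstep]
      obtain ⟨new, e1, e2⟩ := ih v ch
      exact ⟨new, e1, fun d hd => ⟨List.mem_cons_of_mem _ (e2 d hd).1, (e2 d hd).2⟩⟩

def bMissing (n m : Int) (vis : List (Int × Int)) : Nat :=
  (gridCells n m).countP (fun c => decide (c ∉ vis))

theorem countP_lt_of_mem {α : Type} (l : List α) (p q : α → Bool)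
    (hmono : ∀ a ∈ l, q a = true → p a = true) (a : α) (ha : a ∈ l)
    (hp : p a = true) (hq : ¬ q a = true) : l.countP q < l.countP p := by
  induction l with
  | nil => cases ha
  | cons b l ih =>
    simp only [List.countP_cons]
    rcases List.mem_cons.1 ha with rfl | ha
    · have hle : l.countP q ≤ l.countP p :=
        List.countP_mono_left (fun x hx => hmono x (List.mem_cons_of_mem _ hx))
      simp [hp, hq]
      omega
    · have := ih (fun x hx => hmono x (List.mem_cons_of_mem _ hx)) ha
      have hb : q b = true → p b = true := hmono b (List.mem_cons_self ..)
      by_cases hqb : q b = true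
      · simp [hqb, hb hqb]; omega
      · simp [hqb]; omega

theorem bMissing_append_lt (n m : Int) (v new : List (Int × Int)) (d : Int × Int)
    (hd : d ∈ new) (hg : d ∈ gridCells n m) (hnv : d ∉ v) :
    bMissing n m (v ++ new) < bMissing n m v := by
  apply countP_lt_of_mem (a := d)
  · intro a _ ha
    simp only [decide_eq_true_eq] at ha ⊢
    intro hav
    exact ha (List.mem_append_left _ hav)
  · exact hg
  · simpa using hnv
  · simp [hd]

-- the while-changed loop: sweep the whole grid; repeat while the sweep added a cell
def bFix (g : List (List Char)) (n m : Int) (reach : List (Int × Int)) :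
    List (Int × Int) :=
  let p := (gridCells n m).foldl (bTry g) (reach, false)
  if p.2 then bFix g n m p.1 else p.1
termination_by bMissing n m reach
decreasing_by
  rename_i hp2
  obtain ⟨new, h1, h2⟩ := bTry_grow g (gridCells n m) reach false
  have hp2' : (List.foldl (bTry g) (reach, false) (gridCells n m)).2 = true := hp2
  rw [h1] at hp2' ⊢
  simp only [Bool.false_or] at hp2'
  cases new with
  | nil => simp at hp2'
  | cons d t =>
    obtain ⟨hL, hv⟩ := h2 d (List.mem_cons_self ..)
    exact bMissing_append_lt n m reach (d :: t) d (List.mem_cons_self ..) hL hv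

-- start = next((i, j) for i in range(n) for j in range(m) if board[i][j] == '3'):
-- the same row-major window scan as A's get_start_idx, so its port (scanG over the
-- m-column window) is shared.
def solution_alt (board : List String) : Int :=
  let g := board.map (fun s => s.toList)
  let n : Int := board.length
  let m : Int := (board.headD "").toList.length
  match scanG (g.map (fun r => r.take (board.headD "").toList.length)) 0 with
  | none => 0   -- Python raises StopIteration here; excluded by Pre_solution
  | some s =>
    let reach := bFix g n m (PySem.Set.ofList [s])
    let box := reach.any (fun c => cellI g c.1 c.2 == '2')
    let key := reach.any (fun c => cellI g c.1 c.2 == '4')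
    if box && key then 1 else 0

-- ===== PRECONDITION & SPEC =====
-- Pre_ excludes boards on which Python A raises (no '3' in the n×m scan window →
-- RuntimeError, [] → IndexError) and all boards with a row shorter than the first row
-- (m = len(board[0])), on which A's scan or walk may hit an IndexError; A does return on
-- some such short-row boards (see the cite in claim.json) but the shape is excluded wholesale.
def Pre_solution (board : List String) : Prop :=
  board ≠ [] ∧
    (∀ r ∈ board, (board.headD "").toList.length ≤ r.toList.length) ∧
    ∃ r ∈ board, '3' ∈ r.toList.take (board.headD "").toList.length
instance (board : List String) : Decidable (Pre_solution board) := by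
  unfold Pre_solution; infer_instance

def pvWitness_solution : List String := ["3042", "1001"]

def Spec_solution (board : List String) (out : Int) : Prop := out = solution_alt board
instance (board : List String) (out : Int) : Decidable (Spec_solution board out) := by
  unfold Spec_solution; infer_instance

-- ===== CLAIM (what is proved, stated in full; the proofs are below) =====
def Claim_equal_solution : Prop :=
  ∀ (board : List String), Dom_solution board → Pre_solution board →
    Spec_solution board (solution board)

-- ===== LEMMAS AND PROOFS =====

-- reachability through non-wall cells, shared characterization of both programs
def InB (n m : Int) (d : Int × Int) : Prop := 0 ≤ d.1 ∧ d.1 < n ∧ 0 ≤ d.2 ∧ d.2 < m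

def bNbrs (c : Int × Int) : List (Int × Int) :=
  [(c.1 - 1, c.2), (c.1, c.2 - 1), (c.1 + 1, c.2), (c.1, c.2 + 1)]

def Stp (g : List (List Char)) (n m : Int) (c d : Int × Int) : Prop :=
  d ∈ bNbrs c ∧ InB n m d ∧ isWay (cellI g d.1 d.2) = true

def Reach (g : List (List Char)) (n m : Int) (s c : Int × Int) : Prop :=
  Relation.ReflTransGen (Stp g n m) s c

def Has2 (g : List (List Char)) (n m : Int) (s : Int × Int) : Prop :=
  ∃ c, Reach g n m s c ∧ cellI g c.1 c.2 = '2'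

def Has4 (g : List (List Char)) (n m : Int) (s : Int × Int) : Prop :=
  ∃ c, Reach g n m s c ∧ cellI g c.1 c.2 = '4'

theorem way_iff (c : Char) : isWay c = true ↔ c ≠ '1' ∧ c ≠ '@' := by
  simp [isWay]

theorem way_ne_at (c : Char) (h : isWay c = true) : c ≠ '@' := ((way_iff c).1 h).2

theorem mem_ai {P : Prop} [Decidable P] {d e : Int × Int}
    (h : e ∈ (if P then [d] else [])) : P ∧ e = d := by
  split at h
  · exact ⟨‹P›, by simpa using h⟩
  · simp at h

theorem ai_self {P : Prop} [Decidable P] (hp : P) (d : Int × Int) :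
    d ∈ (if P then [d] else []) := by
  rw [if_pos hp]; exact List.mem_singleton.2 rfl

theorem way_false (c : Char) (h : ¬ isWay c = true) : c = '1' ∨ c = '@' := by
  by_contra hc
  exact h ((way_iff c).2 ⟨fun h1 => hc (Or.inl h1), fun h2 => hc (Or.inr h2)⟩)

theorem mem_gridCells (n m : Int) (c : Int × Int) :
    c ∈ gridCells n m ↔ InB n m c := by
  simp [gridCells, InB]
  constructor
  · rintro ⟨a, ha, b, hb, rfl⟩
    refine ⟨by simp, by simpa using ha, by simp, by simpa using hb⟩
  · rintro ⟨h1, h2, h3, h4⟩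
    refine ⟨c.1.toNat, by omega, c.2.toNat, by omega, ?_⟩
    obtain ⟨a, b⟩ := c
    simp only [Prod.mk.injEq]
    constructor <;> simp <;> omega

theorem bfs_nil (g : List (List Char)) (n m : Int) (box key : Bool) :
    bfs g n m [] box key = 0 := by
  rw [bfs]

theorem bfs_cons (g : List (List Char)) (n m x y : Int) (rest : List (Int × Int))
    (box key : Bool) :
    bfs g n m ((x, y) :: rest) box key =
      (if ((if box then box else cellI g x y == '2') &&
           (if key then key else cellI g x y == '4')) = true then 1
       else bfs (mark g x y) n m
         (rest ++ (if 0 < x ∧ isWay (cellI g (x - 1) y) = true then [(x - 1, y)] else [])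
               ++ (if 0 < y ∧ isWay (cellI g x (y - 1)) = true then [(x, y - 1)] else [])
               ++ (if x < n - 1 ∧ isWay (cellI g (x + 1) y) = true then [(x + 1, y)] else [])
               ++ (if y < m - 1 ∧ isWay (cellI g x (y + 1)) = true then [(x, y + 1)] else []))
         (if box then box else cellI g x y == '2')
         (if key then key else cellI g x y == '4')) := by
  rw [bfs]

theorem reach_props (g : List (List Char)) (n m : Int) (s c : Int × Int)
    (hs : InB n m s) (hs3 : cellI g s.1 s.2 = '3') (h : Reach g n m s c) :
    InB n m c ∧ isWay (cellI g c.1 c.2) = true := by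
  induction h with
  | refl => exact ⟨hs, by rw [hs3]; decide⟩
  | tail _ hd _ => exact ⟨hd.2.1, hd.2.2⟩

theorem getD_setRowAt_self (r : List Char) (j : Nat) : (setRowAt r j).getD j '@' = '@' := by
  induction r generalizing j with
  | nil => simp [setRowAt]
  | cons c t ih =>
    cases j with
    | zero => simp [setRowAt]
    | succ j => simpa [setRowAt] using ih j

theorem getD_setAt_self (g : List (List Char)) (i j : Nat) :
    ((setAt g i j).getD i []).getD j '@' = '@' := by
  induction g generalizing i with
  | nil => simp [setAt]
  | cons r t ih =>
    cases i with
    | zero => simpa [setAt] using getD_setRowAt_self r j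
    | succ i => simpa [setAt] using ih i

theorem cellI_mark_self (g : List (List Char)) (x y : Int) :
    cellI (mark g x y) x y = '@' := by
  unfold mark cellI
  by_cases hp : 0 ≤ x ∧ 0 ≤ y
  · simp only [if_pos hp]
    exact getD_setAt_self g x.toNat y.toNat
  · simp only [if_neg hp]

theorem getD_setRowAt_other (r : List Char) (y j : Nat) (h : j ≠ y) :
    (setRowAt r y).getD j '@' = r.getD j '@' := by
  induction r generalizing y j with
  | nil => simp [setRowAt]
  | cons c t ih =>
    cases y with
    | zero =>
      cases j with
      | zero => omega
      | succ j => simp [setRowAt]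
    | succ y =>
      cases j with
      | zero => simp [setRowAt]
      | succ j => simpa [setRowAt] using ih y j (by omega)

theorem getD_setAt_other (g : List (List Char)) (x y i j : Nat)
    (h : i ≠ x ∨ j ≠ y) : ((setAt g x y).getD i []).getD j '@' = (g.getD i []).getD j '@' := by
  induction g generalizing x i with
  | nil => simp [setAt]
  | cons r t ih =>
    cases x with
    | zero =>
      cases i with
      | zero =>
        have hj : j ≠ y := by omega
        simpa [setAt] using getD_setRowAt_other r y j hj
      | succ i => simp [setAt]
    | succ x =>
      cases i with
      | zero => simp [setAt]
      | succ i => simpa [setAt] using ih x i (by omega)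

theorem cellI_mark_other (g : List (List Char)) (x y i j : Int)
    (h : ¬(i = x ∧ j = y)) : cellI (mark g x y) i j = cellI g i j := by
  unfold mark cellI
  by_cases hp : 0 ≤ x ∧ 0 ≤ y
  · simp only [if_pos hp]
    by_cases hij : 0 ≤ i ∧ 0 ≤ j
    · simp only [if_pos hij]
      exact getD_setAt_other g x.toNat y.toNat i.toNat j.toNat (by omega)
    · simp only [if_neg hij]
  · simp only [if_neg hp]

theorem mark_keep (g : List (List Char)) (x y : Int) (d : Int × Int)
    (h : cellI g d.1 d.2 = '@') : cellI (mark g x y) d.1 d.2 = '@' := by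
  by_cases hd : d.1 = x ∧ d.2 = y
  · rw [hd.1, hd.2]; exact cellI_mark_self g x y
  · rw [cellI_mark_other g x y d.1 d.2 hd]; exact h

theorem bfs_char (g0 : List (List Char)) (n m : Int) (s : Int × Int)
    (hs : InB n m s) (hs3 : cellI g0 s.1 s.2 = '3')
    (g : List (List Char)) (q : List (Int × Int)) (box key : Bool)
    (I1 : ∀ i j : Int, cellI g i j ≠ '@' → cellI g i j = cellI g0 i j)
    (I2 : ∀ c : Int × Int, cellI g c.1 c.2 = '@' → cellI g0 c.1 c.2 ≠ '@' → Reach g0 n m s c)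
    (I5a : box = true → Has2 g0 n m s)
    (I5b : box = false → ∀ c : Int × Int, cellI g c.1 c.2 = '@' → cellI g0 c.1 c.2 ≠ '@' →
      cellI g0 c.1 c.2 ≠ '2')
    (I6a : key = true → Has4 g0 n m s)
    (I6b : key = false → ∀ c : Int × Int, cellI g c.1 c.2 = '@' → cellI g0 c.1 c.2 ≠ '@' →
      cellI g0 c.1 c.2 ≠ '4')
    (I7 : ¬(box = true ∧ key = true)) :
    (∀ c ∈ q, Reach g0 n m s c) →
    (∀ c : Int × Int, cellI g c.1 c.2 = '@' → cellI g0 c.1 c.2 ≠ '@' →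
      ∀ d, Stp g0 n m c d → cellI g d.1 d.2 = '@' ∨ d ∈ q) →
    (cellI g s.1 s.2 = '@' ∨ s ∈ q) →
    ((Has2 g0 n m s ∧ Has4 g0 n m s) → bfs g n m q box key = 1) ∧
      (¬(Has2 g0 n m s ∧ Has4 g0 n m s) → bfs g n m q box key = 0) :=
  match q with
  | [] => fun I3 I4 I8 => by
    rw [bfs_nil]
    have hmark : ∀ c, Reach g0 n m s c → cellI g c.1 c.2 = '@' := by
      intro c hc
      induction hc with
      | refl =>
        rcases I8 with h | h
        · exact h
        · simp at h
      | tail hab hbc ih =>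
        rename_i b c'
        have hb0 : cellI g0 b.1 b.2 ≠ '@' :=
          way_ne_at _ (reach_props g0 n m s b hs hs3 hab).2
        rcases I4 b ih hb0 c' hbc with hm | hq
        · exact hm
        · simp at hq
    constructor
    · rintro ⟨⟨c2, hr2, hc2⟩, ⟨c4, hr4, hc4⟩⟩
      exfalso
      have hm2 := hmark c2 hr2
      have hm4 := hmark c4 hr4
      cases hbox : box with
      | false => exact I5b hbox c2 hm2 (by rw [hc2]; decide) hc2
      | true =>
        cases hkey : key with
        | false => exact I6b hkey c4 hm4 (by rw [hc4]; decide) hc4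
        | true => exact I7 ⟨hbox, hkey⟩
    · intro _; rfl
  | (x, y) :: rest => fun I3 I4 I8 => by
    have hxy : Reach g0 n m s (x, y) := I3 (x, y) (List.mem_cons_self ..)
    obtain ⟨hxyb, hxyw⟩ := reach_props g0 n m s (x, y) hs hs3 hxy
    obtain ⟨b1, b2, b3, b4⟩ := hxyb
    rw [bfs_cons]
    by_cases hbk : ((if box then box else cellI g x y == '2') &&
        (if key then key else cellI g x y == '4')) = true
    · rw [if_pos hbk]
      rw [Bool.and_eq_true] at hbk
      have h2 : Has2 g0 n m s := by
        by_cases hbox : box = true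
        · exact I5a hbox
        · rw [Bool.not_eq_true] at hbox
          have hb := hbk.1
          rw [hbox] at hb
          simp only [if_neg (by simp : ¬(false = true))] at hb
          have hb2 : cellI g x y = '2' := by simpa using hb
          have hne : cellI g x y ≠ '@' := by rw [hb2]; decide
          exact ⟨(x, y), hxy, by rw [← I1 x y hne]; exact hb2⟩
      have h4 : Has4 g0 n m s := by
        by_cases hkey : key = true
        · exact I6a hkey
        · rw [Bool.not_eq_true] at hkey
          have hb := hbk.2
          rw [hkey] at hb
          simp only [if_neg (by simp : ¬(false = true))] at hb
          have hb4 : cellI g x y = '4' := by simpa using hb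
          have hne : cellI g x y ≠ '@' := by rw [hb4]; decide
          exact ⟨(x, y), hxy, by rw [← I1 x y hne]; exact hb4⟩
      exact ⟨fun _ => rfl, fun hn => absurd ⟨h2, h4⟩ hn⟩
    · rw [if_neg hbk]
      have hsub : ∀ d, d ∈ rest
            ++ (if 0 < x ∧ isWay (cellI g (x - 1) y) = true then [(x - 1, y)] else [])
            ++ (if 0 < y ∧ isWay (cellI g x (y - 1)) = true then [(x, y - 1)] else [])
            ++ (if x < n - 1 ∧ isWay (cellI g (x + 1) y) = true then [(x + 1, y)] else [])
            ++ (if y < m - 1 ∧ isWay (cellI g x (y + 1)) = true then [(x, y + 1)] else []) →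
          d ∈ rest ∨ (Stp g0 n m (x, y) d ∧ isWay (cellI g d.1 d.2) = true) := by
        intro d hd
        simp only [List.mem_append] at hd
        rcases hd with (((hd | hd) | hd) | hd) | hd
        · exact Or.inl hd
        · obtain ⟨⟨hg, hw⟩, rfl⟩ := mem_ai hd
          refine Or.inr ⟨⟨by simp [bNbrs], ⟨by omega, by omega, b3, b4⟩, ?_⟩, hw⟩
          rw [← I1 (x - 1) y (way_ne_at _ hw)]; exact hw
        · obtain ⟨⟨hg, hw⟩, rfl⟩ := mem_ai hd
          refine Or.inr ⟨⟨by simp [bNbrs], ⟨b1, b2, by omega, by omega⟩, ?_⟩, hw⟩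
          rw [← I1 x (y - 1) (way_ne_at _ hw)]; exact hw
        · obtain ⟨⟨hg, hw⟩, rfl⟩ := mem_ai hd
          refine Or.inr ⟨⟨by simp [bNbrs], ⟨by omega, by omega, b3, b4⟩, ?_⟩, hw⟩
          rw [← I1 (x + 1) y (way_ne_at _ hw)]; exact hw
        · obtain ⟨⟨hg, hw⟩, rfl⟩ := mem_ai hd
          refine Or.inr ⟨⟨by simp [bNbrs], ⟨b1, b2, by omega, by omega⟩, ?_⟩, hw⟩
          rw [← I1 x (y + 1) (way_ne_at _ hw)]; exact hw
      have hq1in : ∀ d, Stp g0 n m (x, y) d → isWay (cellI g d.1 d.2) = true →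
          d ∈ rest
            ++ (if 0 < x ∧ isWay (cellI g (x - 1) y) = true then [(x - 1, y)] else [])
            ++ (if 0 < y ∧ isWay (cellI g x (y - 1)) = true then [(x, y - 1)] else [])
            ++ (if x < n - 1 ∧ isWay (cellI g (x + 1) y) = true then [(x + 1, y)] else [])
            ++ (if y < m - 1 ∧ isWay (cellI g x (y + 1)) = true then [(x, y + 1)] else []) := by
        intro d hst hw
        obtain ⟨hadj, hinb, _⟩ := hst
        obtain ⟨c1, c2, c3, c4⟩ := hinb
        simp only [bNbrs, List.mem_cons, List.not_mem_nil, or_false] at hadj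
        simp only [List.mem_append]
        rcases hadj with rfl | rfl | rfl | rfl
        · exact Or.inl (Or.inl (Or.inl (Or.inr (ai_self ⟨by omega, hw⟩ _))))
        · exact Or.inl (Or.inl (Or.inr (ai_self ⟨by omega, hw⟩ _)))
        · exact Or.inl (Or.inr (ai_self ⟨by omega, hw⟩ _))
        · exact Or.inr (ai_self ⟨by omega, hw⟩ _)
      have I1' : ∀ i j : Int, cellI (mark g x y) i j ≠ '@' →
          cellI (mark g x y) i j = cellI g0 i j := by
        intro i j h
        by_cases hij : i = x ∧ j = y
        · exfalso; rw [hij.1, hij.2] at h; exact h (cellI_mark_self g x y)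
        · rw [cellI_mark_other g x y i j hij] at h ⊢
          exact I1 i j h
      have I2' : ∀ c : Int × Int, cellI (mark g x y) c.1 c.2 = '@' →
          cellI g0 c.1 c.2 ≠ '@' → Reach g0 n m s c := by
        intro c h1 h2
        by_cases hc : c.1 = x ∧ c.2 = y
        · have : c = (x, y) := Prod.ext_iff.2 ⟨hc.1, hc.2⟩
          rw [this]; exact hxy
        · rw [cellI_mark_other g x y c.1 c.2 hc] at h1
          exact I2 c h1 h2
      have I3' : ∀ c ∈ rest
            ++ (if 0 < x ∧ isWay (cellI g (x - 1) y) = true then [(x - 1, y)] else [])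
            ++ (if 0 < y ∧ isWay (cellI g x (y - 1)) = true then [(x, y - 1)] else [])
            ++ (if x < n - 1 ∧ isWay (cellI g (x + 1) y) = true then [(x + 1, y)] else [])
            ++ (if y < m - 1 ∧ isWay (cellI g x (y + 1)) = true then [(x, y + 1)] else []),
          Reach g0 n m s c := by
        intro c hc
        rcases hsub c hc with hc | ⟨hst, _⟩
        · exact I3 c (List.mem_cons_of_mem _ hc)
        · exact Relation.ReflTransGen.tail hxy hst
      have I4' : ∀ c : Int × Int, cellI (mark g x y) c.1 c.2 = '@' →
          cellI g0 c.1 c.2 ≠ '@' → ∀ d, Stp g0 n m c d →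
          cellI (mark g x y) d.1 d.2 = '@' ∨ d ∈ rest
            ++ (if 0 < x ∧ isWay (cellI g (x - 1) y) = true then [(x - 1, y)] else [])
            ++ (if 0 < y ∧ isWay (cellI g x (y - 1)) = true then [(x, y - 1)] else [])
            ++ (if x < n - 1 ∧ isWay (cellI g (x + 1) y) = true then [(x + 1, y)] else [])
            ++ (if y < m - 1 ∧ isWay (cellI g x (y + 1)) = true then [(x, y + 1)] else []) := by
        intro c h1 h2 d hst
        by_cases hc : c.1 = x ∧ c.2 = y
        · have hceq : c = (x, y) := Prod.ext_iff.2 ⟨hc.1, hc.2⟩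
          subst hceq
          by_cases hw : isWay (cellI g d.1 d.2) = true
          · exact Or.inr (hq1in d hst hw)
          · rcases way_false _ hw with h1d | h1d
            · exfalso
              have : cellI g d.1 d.2 ≠ '@' := by rw [h1d]; decide
              rw [I1 d.1 d.2 this] at h1d
              exact absurd h1d ((way_iff _).1 hst.2.2).1
            · exact Or.inl (mark_keep g x y d h1d)
        · rw [cellI_mark_other g x y c.1 c.2 hc] at h1
          rcases I4 c h1 h2 d hst with hm | hq
          · exact Or.inl (mark_keep g x y d hm)
          · rcases List.mem_cons.1 hq with he | hr
            · left
              rw [he, cellI_mark_self g x y]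
            · right
              simp only [List.mem_append]
              exact Or.inl (Or.inl (Or.inl (Or.inl hr)))
      have I5a' : (if box then box else cellI g x y == '2') = true → Has2 g0 n m s := by
        intro h
        by_cases hbox : box = true
        · exact I5a hbox
        · rw [Bool.not_eq_true] at hbox
          rw [hbox] at h
          simp only [if_neg (by simp : ¬(false = true))] at h
          have hb2 : cellI g x y = '2' := by simpa using h
          have hne : cellI g x y ≠ '@' := by rw [hb2]; decide
          exact ⟨(x, y), hxy, by rw [← I1 x y hne]; exact hb2⟩
      have I5b' : (if box then box else cellI g x y == '2') = false →
          ∀ c : Int × Int, cellI (mark g x y) c.1 c.2 = '@' → cellI g0 c.1 c.2 ≠ '@' →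
          cellI g0 c.1 c.2 ≠ '2' := by
        intro h c h1 h2
        cases hbox : box with
        | true => rw [hbox] at h; simp at h
        | false =>
          rw [hbox] at h
          simp only [if_neg (by simp : ¬(false = true))] at h
          have hn2 : cellI g x y ≠ '2' := by simpa using h
          by_cases hc : c.1 = x ∧ c.2 = y
          · rw [hc.1, hc.2]
            by_cases hat : cellI g x y = '@'
            · have := I5b hbox (x, y) hat (by rw [← hc.1, ← hc.2]; exact h2)
              exact this
            · rw [← I1 x y hat]; exact hn2
          · rw [cellI_mark_other g x y c.1 c.2 hc] at h1
            exact I5b hbox c h1 h2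
      have I6a' : (if key then key else cellI g x y == '4') = true → Has4 g0 n m s := by
        intro h
        by_cases hkey : key = true
        · exact I6a hkey
        · rw [Bool.not_eq_true] at hkey
          rw [hkey] at h
          simp only [if_neg (by simp : ¬(false = true))] at h
          have hb4 : cellI g x y = '4' := by simpa using h
          have hne : cellI g x y ≠ '@' := by rw [hb4]; decide
          exact ⟨(x, y), hxy, by rw [← I1 x y hne]; exact hb4⟩
      have I6b' : (if key then key else cellI g x y == '4') = false →
          ∀ c : Int × Int, cellI (mark g x y) c.1 c.2 = '@' → cellI g0 c.1 c.2 ≠ '@' →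
          cellI g0 c.1 c.2 ≠ '4' := by
        intro h c h1 h2
        cases hkey : key with
        | true => rw [hkey] at h; simp at h
        | false =>
          rw [hkey] at h
          simp only [if_neg (by simp : ¬(false = true))] at h
          have hn4 : cellI g x y ≠ '4' := by simpa using h
          by_cases hc : c.1 = x ∧ c.2 = y
          · rw [hc.1, hc.2]
            by_cases hat : cellI g x y = '@'
            · exact I6b hkey (x, y) hat (by rw [← hc.1, ← hc.2]; exact h2)
            · rw [← I1 x y hat]; exact hn4
          · rw [cellI_mark_other g x y c.1 c.2 hc] at h1
            exact I6b hkey c h1 h2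
      have I7' : ¬((if box then box else cellI g x y == '2') = true ∧
          (if key then key else cellI g x y == '4') = true) :=
        fun hh => hbk (by rw [hh.1, hh.2]; rfl)
      have I8' : cellI (mark g x y) s.1 s.2 = '@' ∨ s ∈ rest
            ++ (if 0 < x ∧ isWay (cellI g (x - 1) y) = true then [(x - 1, y)] else [])
            ++ (if 0 < y ∧ isWay (cellI g x (y - 1)) = true then [(x, y - 1)] else [])
            ++ (if x < n - 1 ∧ isWay (cellI g (x + 1) y) = true then [(x + 1, y)] else [])
            ++ (if y < m - 1 ∧ isWay (cellI g x (y + 1)) = true then [(x, y + 1)] else []) := by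
        by_cases hsx : s.1 = x ∧ s.2 = y
        · left; rw [hsx.1, hsx.2]; exact cellI_mark_self g x y
        · rcases I8 with h | h
          · left; rw [cellI_mark_other g x y s.1 s.2 hsx]; exact h
          · rcases List.mem_cons.1 h with he | hr
            · left; rw [he, cellI_mark_self g x y]
            · right
              simp only [List.mem_append]
              exact Or.inl (Or.inl (Or.inl (Or.inl hr)))
      exact bfs_char g0 n m s hs hs3 (mark g x y) _ _ _
        I1' I2' I5a' I5b' I6a' I6b' I7' I3' I4' I8'
termination_by (bfsU g, bfsG g q)
decreasing_by
  by_cases h : cellI g x y = '@'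
  · rw [mark_of_at g x y h]
    apply Prod.Lex.right
    have h1 := bfsG_ite g (0 < x ∧ isWay (cellI g (x - 1) y) = true) (x - 1, y) (fun hp => hp.2)
    have h2 := bfsG_ite g (0 < y ∧ isWay (cellI g x (y - 1)) = true) (x, y - 1) (fun hp => hp.2)
    have h3 := bfsG_ite g (x < n - 1 ∧ isWay (cellI g (x + 1) y) = true) (x + 1, y) (fun hp => hp.2)
    have h4 := bfsG_ite g (y < m - 1 ∧ isWay (cellI g x (y + 1)) = true) (x, y + 1) (fun hp => hp.2)
    rw [bfsG_cons_at g x y rest h]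
    simp only [bfsG_append]
    omega
  · exact Prod.Lex.left _ _ (bfsU_mark_lt g x y h)

-- B-side proof lemmas: soundness, closure at the fixpoint, and the characterization

theorem stp_of_nbr (g : List (List Char)) (n m : Int) (c d : Int × Int)
    (he : c ∈ bNbrs d) (hb : InB n m d) (hw : isWay (cellI g d.1 d.2) = true) :
    Stp g n m c d := by
  obtain ⟨a, b⟩ := c
  obtain ⟨x, y⟩ := d
  simp only [bNbrs, List.mem_cons, List.not_mem_nil, or_false, Prod.mk.injEq] at he
  refine ⟨?_, hb, hw⟩
  simp only [bNbrs, List.mem_cons, List.not_mem_nil, or_false, Prod.mk.injEq]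
  rcases he with ⟨h1, h2⟩ | ⟨h1, h2⟩ | ⟨h1, h2⟩ | ⟨h1, h2⟩ <;> omega

theorem bTry_sound (g : List (List Char)) (n m : Int) (s : Int × Int)
    (L : List (Int × Int)) (hL : ∀ c ∈ L, InB n m c) (v : List (Int × Int)) (ch : Bool)
    (hv : ∀ c ∈ v, Reach g n m s c) :
    ∀ c ∈ (L.foldl (bTry g) (v, ch)).1, Reach g n m s c := by
  induction L generalizing v ch with
  | nil => exact hv
  | cons c L ih =>
    simp only [List.foldl_cons]
    by_cases hc : c ∉ v ∧ isWay (cellI g c.1 c.2) = true ∧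
        ((c.1 - 1, c.2) ∈ v ∨ (c.1, c.2 - 1) ∈ v ∨ (c.1 + 1, c.2) ∈ v ∨ (c.1, c.2 + 1) ∈ v)
    · have hstep : bTry g (v, ch) c = (v ++ [c], true) := by
        simp only [bTry, if_pos hc]
        rw [PySem.Set.add_of_not_mem hc.1]
      rw [hstep]
      refine ih (fun d hd => hL d (List.mem_cons_of_mem _ hd)) (v ++ [c]) true ?_
      intro d hd
      rcases List.mem_append.1 hd with hd | hd
      · exact hv d hd
      · rw [List.mem_singleton.1 hd]
        have hbc : InB n m c := hL c (List.mem_cons_self ..)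
        rcases hc.2.2 with he | he | he | he
        · exact Relation.ReflTransGen.tail (hv _ he)
            (stp_of_nbr g n m (c.1 - 1, c.2) c (by simp [bNbrs]) hbc hc.2.1)
        · exact Relation.ReflTransGen.tail (hv _ he)
            (stp_of_nbr g n m (c.1, c.2 - 1) c (by simp [bNbrs]) hbc hc.2.1)
        · exact Relation.ReflTransGen.tail (hv _ he)
            (stp_of_nbr g n m (c.1 + 1, c.2) c (by simp [bNbrs]) hbc hc.2.1)
        · exact Relation.ReflTransGen.tail (hv _ he)
            (stp_of_nbr g n m (c.1, c.2 + 1) c (by simp [bNbrs]) hbc hc.2.1)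
    · have hstep : bTry g (v, ch) c = (v, ch) := by simp only [bTry, if_neg hc]
      rw [hstep]
      exact ih (fun d hd => hL d (List.mem_cons_of_mem _ hd)) v ch hv

theorem bTry_fix (g : List (List Char)) (L : List (Int × Int)) (v : List (Int × Int))
    (ch : Bool) (h : (L.foldl (bTry g) (v, ch)).1 = v) :
    ∀ c ∈ L, ¬(c ∉ v ∧ isWay (cellI g c.1 c.2) = true ∧
      ((c.1 - 1, c.2) ∈ v ∨ (c.1, c.2 - 1) ∈ v ∨ (c.1 + 1, c.2) ∈ v ∨ (c.1, c.2 + 1) ∈ v)) := by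
  induction L generalizing v ch with
  | nil => intro c hc; cases hc
  | cons c L ih =>
    simp only [List.foldl_cons] at h
    by_cases hc : c ∉ v ∧ isWay (cellI g c.1 c.2) = true ∧
        ((c.1 - 1, c.2) ∈ v ∨ (c.1, c.2 - 1) ∈ v ∨ (c.1 + 1, c.2) ∈ v ∨ (c.1, c.2 + 1) ∈ v)
    · exfalso
      have hstep : bTry g (v, ch) c = (v ++ [c], true) := by
        simp only [bTry, if_pos hc]
        rw [PySem.Set.add_of_not_mem hc.1]
      rw [hstep] at h
      obtain ⟨new, e1, _⟩ := bTry_grow g L (v ++ [c]) true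
      rw [e1] at h
      simp only at h
      have := congrArg List.length h
      simp at this
    · have hstep : bTry g (v, ch) c = (v, ch) := by simp only [bTry, if_neg hc]
      rw [hstep] at h
      intro d hd
      rcases List.mem_cons.1 hd with rfl | hd
      · exact hc
      · exact ih v ch h d hd

theorem bFix_char (g : List (List Char)) (n m : Int) (s : Int × Int)
    (reach : List (Int × Int))
    (h1 : ∀ c ∈ reach, Reach g n m s c) (h2 : s ∈ reach) :
    ∀ c, c ∈ bFix g n m reach ↔ Reach g n m s c := by
  rw [bFix.eq_def]
  obtain ⟨new, e1, e2⟩ := bTry_grow g (gridCells n m) reach false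
  simp only [e1, Bool.false_or]
  cases new with
  | cons d t =>
    intro c
    rw [if_pos (by simp)]
    have h1' : ∀ c ∈ reach ++ d :: t, Reach g n m s c := by
      have := bTry_sound g n m s (gridCells n m)
        (fun c hc => (mem_gridCells n m c).1 hc) reach false h1
      rw [e1] at this
      exact this
    exact bFix_char g n m s (reach ++ d :: t) h1' (List.mem_append_left _ h2) c
  | nil =>
    intro c
    rw [if_neg (by simp), List.append_nil]
    constructor
    · exact h1 c
    · intro hc
      have hfix := bTry_fix g (gridCells n m) reach false (by rw [e1]; simp)
      induction hc with
      | refl => exact h2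
      | tail hab hbc ih =>
        rename_i b d
        obtain ⟨hadj, hinb, hw⟩ := hbc
        have hd : d ∈ gridCells n m := (mem_gridCells n m d).2 hinb
        have := hfix d hd
        by_contra hdv
        apply this
        refine ⟨hdv, hw, ?_⟩
        obtain ⟨a1, a2⟩ := b
        obtain ⟨x, y⟩ := d
        simp only [bNbrs, List.mem_cons, List.not_mem_nil, or_false, Prod.mk.injEq] at hadj
        rcases hadj with ⟨r1, r2⟩ | ⟨r1, r2⟩ | ⟨r1, r2⟩ | ⟨r1, r2⟩
        · right; right; left
          have : (x + 1, y) = (a1, a2) := by simp [Prod.ext_iff]; omega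
          rw [this]; exact ih
        · right; right; right
          have : (x, y + 1) = (a1, a2) := by simp [Prod.ext_iff]; omega
          rw [this]; exact ih
        · left
          have : (x - 1, y) = (a1, a2) := by simp [Prod.ext_iff]; omega
          rw [this]; exact ih
        · right; left
          have : (x, y - 1) = (a1, a2) := by simp [Prod.ext_iff]; omega
          rw [this]; exact ih
termination_by bMissing n m reach
decreasing_by
  obtain ⟨hL, hv⟩ := e2 d (List.mem_cons_self ..)
  exact bMissing_append_lt n m reach (d :: t) d (List.mem_cons_self ..) hL hv

theorem scanRow_spec (r : List Char) (j y : Int) (h : scanRow r j = some y) :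
    ∃ k : Nat, k < r.length ∧ y = j + k ∧ r.getD k '@' = '3' := by
  induction r generalizing j with
  | nil => simp [scanRow] at h
  | cons c t ih =>
    rw [scanRow] at h
    by_cases hc : c == '3'
    · rw [if_pos hc] at h
      injection h with h
      subst h
      exact ⟨0, by simp, by simp, by simpa using (by simpa using hc : c = '3')⟩
    · rw [if_neg hc] at h
      obtain ⟨k, hk, hy, h3⟩ := ih (j + 1) h
      exact ⟨k + 1, by simpa using hk, by omega, by simpa using h3⟩

theorem scanRow_none (r : List Char) (j : Int) : scanRow r j = none ↔ '3' ∉ r := by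
  induction r generalizing j with
  | nil => simp [scanRow]
  | cons c t ih =>
    rw [scanRow]
    by_cases hc : c == '3'
    · simp only [if_pos hc]
      simp [(by simpa using hc : c = '3')]
    · simp only [if_neg hc]
      rw [ih (j + 1)]
      have hc3 : c ≠ '3' := by simpa using hc
      simp [List.mem_cons, Ne.symm hc3]

theorem scanG_spec (g : List (List Char)) (i : Int) (s : Int × Int) (h : scanG g i = some s) :
    ∃ k : Nat, k < g.length ∧ s.1 = i + k ∧ scanRow (g.getD k []) 0 = some s.2 := by
  induction g generalizing i with
  | nil => simp [scanG] at h
  | cons r t ih =>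
    rw [scanG] at h
    cases hsr : scanRow r 0 with
    | some j =>
      rw [hsr] at h
      injection h with h
      subst h
      exact ⟨0, by simp, by simp, by simpa using hsr⟩
    | none =>
      rw [hsr] at h
      obtain ⟨k, hk, h1, h2⟩ := ih (i + 1) h
      exact ⟨k + 1, by simpa using hk, by omega, by simpa using h2⟩

theorem scanG_none (g : List (List Char)) (i : Int) :
    scanG g i = none ↔ ∀ r ∈ g, '3' ∉ r := by
  induction g generalizing i with
  | nil => simp [scanG]
  | cons r t ih =>
    rw [scanG]
    cases hsr : scanRow r 0 with
    | some j =>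
      simp only []
      constructor
      · intro h; cases h
      · intro h
        obtain ⟨k, hk, _, h3⟩ := scanRow_spec r 0 j hsr
        have h3m : '3' ∈ r := by
          rw [List.getD_eq_getElem r '@' hk] at h3
          rw [← h3]
          exact List.getElem_mem hk
        exact absurd h3m (h r (List.mem_cons_self ..))
    | none =>
      rw [ih (i + 1)]
      have hr := (scanRow_none r 0).1 hsr
      simp [hr]

theorem pre_start (board : List String) (hpre : Pre_solution board) :
    ∃ s : Int × Int,
      scanG ((board.map (fun t => t.toList)).map
        (fun r => r.take ((board.map (fun t => t.toList)).headD []).length)) 0 = some s ∧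
      InB (board.map (fun t => t.toList)).length
        ((board.map (fun t => t.toList)).headD []).length s ∧
      cellI (board.map (fun t => t.toList)) s.1 s.2 = '3' := by
  obtain ⟨hne, hge, r3, hr3m, h33⟩ := hpre
  have hmeq : ((board.map (fun t => t.toList)).headD []).length =
      (board.headD "").toList.length := by
    cases board with
    | nil => exact absurd rfl hne
    | cons b bt => rfl
  have hg3 : ∃ r ∈ (board.map (fun t => t.toList)).map
      (fun r => r.take ((board.map (fun t => t.toList)).headD []).length), '3' ∈ r := by
    refine ⟨r3.toList.take ((board.map (fun t => t.toList)).headD []).length,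
      List.mem_map_of_mem (List.mem_map_of_mem hr3m), ?_⟩
    rw [hmeq]
    exact h33
  cases hsc : scanG ((board.map (fun t => t.toList)).map
      (fun r => r.take ((board.map (fun t => t.toList)).headD []).length)) 0 with
  | none =>
    exfalso
    obtain ⟨r, hr, h3⟩ := hg3
    exact ((scanG_none _ 0).1 hsc) r hr h3
  | some s =>
    obtain ⟨k, hk, hs1, hrow⟩ := scanG_spec _ 0 s hsc
    rw [List.length_map] at hk
    have hrowT : ((board.map (fun t => t.toList)).map
        (fun r => r.take ((board.map (fun t => t.toList)).headD []).length)).getD k [] =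
        ((board.map (fun t => t.toList)).getD k []).take
          ((board.map (fun t => t.toList)).headD []).length := by
      rw [List.getD_eq_getElem _ [] (by rw [List.length_map]; exact hk),
        List.getD_eq_getElem _ [] hk, List.getElem_map]
    rw [hrowT] at hrow
    obtain ⟨k', hk', hs2, h3'⟩ := scanRow_spec _ 0 s.2 hrow
    rw [List.length_take] at hk'
    have hkm : k' < ((board.map (fun t => t.toList)).headD []).length := by omega
    have hkr : k' < ((board.map (fun t => t.toList)).getD k []).length := by omega
    have d1 : (0:Int) ≤ s.1 := by omega
    have d2 : s.1 < ((board.map (fun t => t.toList)).length : Int) := by omega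
    have d3 : (0:Int) ≤ s.2 := by omega
    have d4 : s.2 < (((board.map (fun t => t.toList)).headD []).length : Int) := by omega
    refine ⟨s, rfl, ⟨d1, d2, d3, d4⟩, ?_⟩
    unfold cellI
    rw [if_pos ⟨by omega, by omega⟩]
    have h1 : s.1.toNat = k := by omega
    have h2 : s.2.toNat = k' := by omega
    rw [h1, h2]
    rw [List.getD_eq_getElem _ '@' hkr]
    rw [List.getD_eq_getElem _ '@' (by rw [List.length_take]; omega)] at h3'
    rw [← h3', List.getElem_take]

-- ===== VERDICT (by name: the statement is the Claim_ definition above) =====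
theorem solution_spec : Claim_equal_solution := by
  intro board _ hpre
  unfold Spec_solution
  obtain ⟨s, hsc, hsInB, hs3⟩ := pre_start board hpre
  have hmhead : ((board.map (fun t => t.toList)).headD []).length =
      (board.headD "").toList.length := by
    cases board with
    | nil => rfl
    | cons b bt => rfl
  have hofs : PySem.Set.ofList [s] = [s] := rfl
  have hA : solution board = bfs (board.map (fun t => t.toList))
      (board.map (fun t => t.toList)).length
      ((board.map (fun t => t.toList)).headD []).length [s] false false := by
    simp only [solution, hsc]
  have hB : solution_alt board = (if
      ((bFix (board.map (fun t => t.toList)) (board.map (fun t => t.toList)).length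
          ((board.map (fun t => t.toList)).headD []).length [s]).any
        (fun c => cellI (board.map (fun t => t.toList)) c.1 c.2 == '2') &&
      (bFix (board.map (fun t => t.toList)) (board.map (fun t => t.toList)).length
          ((board.map (fun t => t.toList)).headD []).length [s]).any
        (fun c => cellI (board.map (fun t => t.toList)) c.1 c.2 == '4')) = true
      then 1 else 0) := by
    simp only [solution_alt, ← hmhead, hsc, List.length_map, hofs]
  have hab := bfs_char (board.map (fun t => t.toList))
    (board.map (fun t => t.toList)).length
    ((board.map (fun t => t.toList)).headD []).length s hsInB hs3
    (board.map (fun t => t.toList)) [s] false false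
    (fun _ _ _ => rfl) (fun c h1 h2 => absurd h1 h2)
    (by simp) (fun _ c h1 h2 => absurd h1 h2)
    (by simp) (fun _ c h1 h2 => absurd h1 h2)
    (by simp)
    (by intro c hc; rw [List.mem_singleton] at hc; subst hc; exact Relation.ReflTransGen.refl)
    (fun c h1 h2 => absurd h1 h2)
    (Or.inr (List.mem_singleton.2 rfl))
  have hiff := bFix_char (board.map (fun t => t.toList))
    (board.map (fun t => t.toList)).length
    ((board.map (fun t => t.toList)).headD []).length s [s]
    (by intro c hc; rw [List.mem_singleton] at hc; subst hc; exact Relation.ReflTransGen.refl)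
    (List.mem_singleton.2 rfl)
  have hbox : ((bFix (board.map (fun t => t.toList)) (board.map (fun t => t.toList)).length
      ((board.map (fun t => t.toList)).headD []).length [s]).any
      (fun c => cellI (board.map (fun t => t.toList)) c.1 c.2 == '2')) = true ↔
      Has2 (board.map (fun t => t.toList)) (board.map (fun t => t.toList)).length
        ((board.map (fun t => t.toList)).headD []).length s := by
    rw [List.any_eq_true]
    constructor
    · rintro ⟨c, hc, hbe⟩
      exact ⟨c, (hiff c).1 hc, by simpa using hbe⟩
    · rintro ⟨c, hr, he⟩
      exact ⟨c, (hiff c).2 hr, by simpa using he⟩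
  have hkey : ((bFix (board.map (fun t => t.toList)) (board.map (fun t => t.toList)).length
      ((board.map (fun t => t.toList)).headD []).length [s]).any
      (fun c => cellI (board.map (fun t => t.toList)) c.1 c.2 == '4')) = true ↔
      Has4 (board.map (fun t => t.toList)) (board.map (fun t => t.toList)).length
        ((board.map (fun t => t.toList)).headD []).length s := by
    rw [List.any_eq_true]
    constructor
    · rintro ⟨c, hc, hbe⟩
      exact ⟨c, (hiff c).1 hc, by simpa using hbe⟩
    · rintro ⟨c, hr, he⟩
      exact ⟨c, (hiff c).2 hr, by simpa using he⟩
  rw [hA, hB]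
  by_cases hcase : Has2 (board.map (fun t => t.toList)) (board.map (fun t => t.toList)).length
      ((board.map (fun t => t.toList)).headD []).length s ∧
      Has4 (board.map (fun t => t.toList)) (board.map (fun t => t.toList)).length
        ((board.map (fun t => t.toList)).headD []).length s
  · rw [hab.1 hcase, if_pos (by rw [Bool.and_eq_true, hbox, hkey]; exact hcase)]
  · rw [hab.2 hcase, if_neg ?_]
    rw [Bool.and_eq_true, hbox, hkey]
    exact hcase
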